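-- pv_equiv track=rewrite | github.com/dimtsi/AoC2024 | Day24/run.py | get_maxs
-- ===== SOURCE A (Python) =====
-- def get_maxs(I):
--     maxx = 0
--     maxy = 0
--     maxz = 0
--     for n1, op, n2, target in I:
--         # n1, op, n2, target = iin
--
--         for n in [n1, n2, target]:
--             if n.startswith("x"):
--                 maxx = max(maxx, int(n[1:]))
--
--             if n.startswith("y"):
--                 maxy = max(maxy, int(n[1:]))
--
--             if n.startswith("z"):
--                 maxz = max(maxz, int(n[1:]))
--     return maxx, maxy, maxz
-- ===== SOURCE B (Python) =====
-- def get_maxs(I):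
--     names = [n for n1, op, n2, target in I for n in (n1, n2, target)]
--
--     def mx(prefix):
--         return max([0] + [int(n[1:]) for n in names if n.startswith(prefix)])
--
--     return mx("x"), mx("y"), mx("z")
-- ===== Notes on version B (the rewrite author's own statement) =====
-- stated objective: simpler
-- what changed: Instead of one combined scan mutating three accumulators with nested ifs, B flattens the relevant gate names into one list and computes each of the three answers as an independent max over the names with that prefix.
import Mathlib
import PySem

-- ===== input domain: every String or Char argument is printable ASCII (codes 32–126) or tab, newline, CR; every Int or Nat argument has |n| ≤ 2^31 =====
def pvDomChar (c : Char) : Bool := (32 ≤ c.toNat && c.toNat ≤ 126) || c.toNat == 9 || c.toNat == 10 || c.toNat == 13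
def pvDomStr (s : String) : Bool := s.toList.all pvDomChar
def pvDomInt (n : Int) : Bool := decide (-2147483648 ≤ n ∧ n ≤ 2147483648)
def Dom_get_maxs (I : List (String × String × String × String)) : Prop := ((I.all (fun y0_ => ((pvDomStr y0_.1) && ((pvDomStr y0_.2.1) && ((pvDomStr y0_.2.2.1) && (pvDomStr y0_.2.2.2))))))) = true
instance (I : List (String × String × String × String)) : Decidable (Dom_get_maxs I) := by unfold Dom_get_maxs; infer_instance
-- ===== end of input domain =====

-- B replaces A's single scan with three mutating accumulators by three independent
-- maxima over a flattened list of the gates' name fields (simpler decomposition; return value only).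

-- int(n[1:]) of a name; on Pre_ the parse always succeeds, .getD 0 never fires there
def pvVal (n : String) : Int :=
  (PySem.Int.ofStr? (PySem.Str.slice n (some 1) none)).getD 0

-- ===== PORT A =====
def get_maxs (I : List (String × String × String × String)) : Int × Int × Int :=
  I.foldl (fun acc g =>
    [g.1, g.2.2.1, g.2.2.2].foldl (fun m n =>
      let m := if PySem.Str.startswith n "x" then (max m.1 (pvVal n), m.2.1, m.2.2) else m
      let m := if PySem.Str.startswith n "y" then (m.1, max m.2.1 (pvVal n), m.2.2) else m
      let m := if PySem.Str.startswith n "z" then (m.1, m.2.1, max m.2.2 (pvVal n)) else m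
      m) acc) (0, 0, 0)

-- ===== PORT B =====
def pvNames (I : List (String × String × String × String)) : List String :=
  I.flatMap (fun g => [g.1, g.2.2.1, g.2.2.2])

-- max([0] + [int(n[1:]) for n in names if n.startswith(p)])
def pvMx (names : List String) (p : String) : Int :=
  (((names.filter (fun n => PySem.Str.startswith n p)).map pvVal)).foldl max 0

def get_maxs_alt (I : List (String × String × String × String)) : Int × Int × Int :=
  let names := pvNames I
  (pvMx names "x", pvMx names "y", pvMx names "z")

-- ===== PRECONDITION & SPEC =====
-- Pre_ excludes exactly the inputs where A raises ValueError: a name field that starts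
-- with "x"/"y"/"z" but whose tail is not a valid int literal.
def Pre_get_maxs (I : List (String × String × String × String)) : Prop :=
  ∀ g ∈ I, ∀ n ∈ [g.1, g.2.2.1, g.2.2.2],
    (PySem.Str.startswith n "x" ∨ PySem.Str.startswith n "y" ∨ PySem.Str.startswith n "z") →
      (PySem.Int.ofStr? (PySem.Str.slice n (some 1) none)).isSome

instance (I : List (String × String × String × String)) : Decidable (Pre_get_maxs I) := by
  unfold Pre_get_maxs; infer_instance

def pvWitness_get_maxs : (List (String × String × String × String)) :=
  [("x00", "AND", "y00", "z01"), ("a1", "XOR", "x12", "z05")]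

def Spec_get_maxs (I : List (String × String × String × String)) (out : Int × Int × Int) : Prop := out = get_maxs_alt I
instance (I : List (String × String × String × String)) (out : Int × Int × Int) : Decidable (Spec_get_maxs I out) := by unfold Spec_get_maxs; infer_instance

-- ===== CLAIM (what is proved, stated in full; the proofs are below) =====
def Claim_equal_get_maxs : Prop := ∀ (I : List (String × String × String × String)), Dom_get_maxs I → Pre_get_maxs I → Spec_get_maxs I (get_maxs I)

-- ===== LEMMAS AND PROOFS =====

-- the inner-loop body of A, named for the proofs
def pvStep (m : Int × Int × Int) (n : String) : Int × Int × Int :=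
  let m := if PySem.Str.startswith n "x" then (max m.1 (pvVal n), m.2.1, m.2.2) else m
  let m := if PySem.Str.startswith n "y" then (m.1, max m.2.1 (pvVal n), m.2.2) else m
  let m := if PySem.Str.startswith n "z" then (m.1, m.2.1, max m.2.2 (pvVal n)) else m
  m

def pvF (p : String) (a : Int) (n : String) : Int :=
  if PySem.Str.startswith n p then max a (pvVal n) else a

lemma pvStep_eq (m : Int × Int × Int) (n : String) :
    pvStep m n = (pvF "x" m.1 n, pvF "y" m.2.1 n, pvF "z" m.2.2 n) := by
  simp only [pvStep, pvF]
  split_ifs <;> rfl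

lemma foldl_step_split (ns : List String) :
    ∀ a b c : Int, ns.foldl pvStep (a, b, c) =
      (ns.foldl (pvF "x") a, ns.foldl (pvF "y") b, ns.foldl (pvF "z") c) := by
  induction ns with
  | nil => intro a b c; rfl
  | cons n t ih =>
      intro a b c
      simp only [List.foldl_cons, pvStep_eq, ih]

lemma get_maxs_eq_flat (I : List (String × String × String × String)) :
    ∀ acc : Int × Int × Int,
      I.foldl (fun acc g => [g.1, g.2.2.1, g.2.2.2].foldl pvStep acc) acc =
        (pvNames I).foldl pvStep acc := by
  induction I with
  | nil => intro acc; rfl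
  | cons g t ih =>
      intro acc
      simp only [List.foldl_cons, pvNames, List.flatMap_cons, List.foldl_append]
      exact ih _

lemma foldl_pvF_eq (p : String) (ns : List String) :
    ∀ a : Int, ns.foldl (pvF p) a =
      ((ns.filter (fun n => PySem.Str.startswith n p)).map pvVal).foldl max a := by
  induction ns with
  | nil => intro a; rfl
  | cons n t ih =>
      intro a
      simp only [List.foldl_cons, List.filter_cons, pvF]
      split_ifs with h <;> simp [ih]

-- ===== VERDICT (by name: the statement is the Claim_ definition above) =====
theorem get_maxs_spec : Claim_equal_get_maxs := by
  intro I _ _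
  unfold Spec_get_maxs get_maxs get_maxs_alt
  show I.foldl (fun acc g => [g.1, g.2.2.1, g.2.2.2].foldl pvStep acc) (0, 0, 0) = _
  rw [get_maxs_eq_flat, foldl_step_split]
  simp only [pvMx, foldl_pvF_eq]
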